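-- pv_equiv track=rewrite | github.com/sungyeon2022/pyCode | Python/행렬과 연산.py | solution
-- ===== SOURCE A (Python) =====
-- from collections import deque
--
-- def solution(rc, operations):
--     r_len, c_len = len(rc),len(rc[0])
--
--     rows = deque(deque(row[1:-1])for row in rc)
--     out_cols = [deque(rc[r][0] for r in range(r_len)),
--                 deque(rc[r][c_len-1]for r in range(r_len))]
--
--     for operation in operations:
--         if operation[0] == "S":
--             rows.appendleft(rows.pop())
--             out_cols[0].appendleft(out_cols[0].pop())
--             out_cols[1].appendleft(out_cols[1].pop())
--
--         # Rotate 연산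
--         else:
--             rows[r_len - 1].append(out_cols[1].pop())
--             out_cols[0].append(rows[r_len - 1].popleft())
--             rows[0].appendleft(out_cols[0].popleft())
--             out_cols[1].appendleft(rows[0].pop())
--
--     answer = []
--     for r in range(r_len):
--         answer.append([])
--         answer[r].append(out_cols[0][r])
--         answer[r].extend(rows[r])
--         answer[r].append(out_cols[1][r])
--
--     return answer
-- ===== SOURCE B (Python) =====
-- def _rotate(g):
--     top, mid, bot = g[0], g[1:-1], g[-1]
--     lefts = [row[0] for row in mid] + [bot[0]]      # left column entries below the top, which move up
--     rights = [top[-1]] + [row[-1] for row in mid]   # right column entries above the bottom, which move down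
--     new_top = [lefts[0]] + top[:-1]                 # top row shifts right; corner fed from below
--     new_bot = bot[1:] + [rights[-1]]                # bottom row shifts left; corner fed from above
--     new_mid = [[l] + row[1:-1] + [r] for l, row, r in zip(lefts[1:], mid, rights[:-1])]
--     return [new_top] + new_mid + [new_bot]
--
--
-- def solution(rc, operations):
--     g = [list(row) for row in rc]
--     for op in operations:
--         if op[0] == "S":
--             g = [g[-1]] + g[:-1]
--         else:
--             g = _rotate(g)
--     return g
-- ===== Notes on version B (the rewrite author's own statement) =====
-- stated objective: simpler
-- what changed: B keeps the matrix as a plain list of rows and, per operation, moves the last row to the front or rebuilds the border ring (new top/middle/bottom rows) functionally, instead of A's mutable decomposition into inner-row deques plus two out-column deques that is re-zipped into a matrix at the end.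
-- outside the precondition, e.g. on solution([[1], [2]], ['Rotate']): A returns [[2, 1], [2, 1]], B returns [[2], [1]]; on solution([[1, 2, 3]], ['Rotate']): A returns [[2, 1, 3]], B returns [[1, 1, 2], [2, 3, 3]]; on solution([[1, 2], [3, 4, 5]], ['Rotate']): A returns [[3, 1], [4, 4, 2]], B returns [[3, 1], [4, 5, 2]]
import Mathlib
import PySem

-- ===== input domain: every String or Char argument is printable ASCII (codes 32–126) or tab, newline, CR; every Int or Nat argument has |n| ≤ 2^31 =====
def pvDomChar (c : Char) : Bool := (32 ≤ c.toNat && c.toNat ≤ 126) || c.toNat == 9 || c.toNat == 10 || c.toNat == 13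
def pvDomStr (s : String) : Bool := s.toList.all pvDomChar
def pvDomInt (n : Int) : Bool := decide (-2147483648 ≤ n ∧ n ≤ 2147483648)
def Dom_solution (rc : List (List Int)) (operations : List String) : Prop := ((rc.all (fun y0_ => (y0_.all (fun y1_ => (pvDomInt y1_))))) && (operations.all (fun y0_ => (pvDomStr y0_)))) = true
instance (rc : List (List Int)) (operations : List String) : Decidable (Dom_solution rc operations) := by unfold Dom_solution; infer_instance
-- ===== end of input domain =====

-- B keeps the matrix as a plain list of rows and rebuilds the border ring functionally per
-- operation, instead of A's mutable deque decomposition (inner rows + two out columns).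
-- A does not mutate its arguments; the equivalence is about the return value.

-- ===== PORT A =====
-- A's per-operation state: (rows = deque of inner rows, out_cols[0], out_cols[1]).
-- deque.appendleft(x) = cons, .pop() = getLastD/dropLast, .popleft() = headD/tail,
-- in-place update of rows[i] = List.set i.
def stepA (rLen : Nat) (st : List (List Int) × List Int × List Int) (op : String) :
    List (List Int) × List Int × List Int :=
  let rows := st.1; let c0 := st.2.1; let c1 := st.2.2
  if PySem.Str.pyGet? op 0 = some 'S' then
    (rows.getLastD [] :: rows.dropLast,
     c0.getLastD 0 :: c0.dropLast,
     c1.getLastD 0 :: c1.dropLast)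
  else
    let a := c1.getLastD 0                                   -- out_cols[1].pop()
    let c1' := c1.dropLast
    let rowsA := rows.set (rLen - 1) (rows.getD (rLen - 1) [] ++ [a])   -- rows[r_len-1].append(a)
    let b := (rowsA.getD (rLen - 1) []).headD 0              -- rows[r_len-1].popleft()
    let rowsB := rowsA.set (rLen - 1) ((rowsA.getD (rLen - 1) []).tail)
    let c0' := c0 ++ [b]                                     -- out_cols[0].append(b)
    let cc := c0'.headD 0                                    -- out_cols[0].popleft()
    let c0'' := c0'.tail
    let rowsC := rowsB.set 0 (cc :: rowsB.getD 0 [])         -- rows[0].appendleft(cc)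
    let d := (rowsC.getD 0 []).getLastD 0                    -- rows[0].pop()
    let rowsD := rowsC.set 0 ((rowsC.getD 0 []).dropLast)
    (rowsD, c0'', d :: c1')                                  -- out_cols[1].appendleft(d)

def solution (rc : List (List Int)) (operations : List String) : List (List Int) :=
  let rLen := rc.length
  let cLen := (rc.headD []).length
  let init : List (List Int) × List Int × List Int :=
    (rc.map (fun row => PySem.List.slice row (some 1) (some (-1))),   -- deque(row[1:-1])
     rc.map (fun row => row.headD 0),                                 -- rc[r][0]
     rc.map (fun row => PySem.List.pyGetD row ((cLen : Int) - 1) 0))  -- rc[r][c_len-1]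
  let st := operations.foldl (stepA rLen) init
  (List.range rLen).map (fun r => st.2.1.getD r 0 :: (st.1.getD r [] ++ [st.2.2.getD r 0]))

-- ===== PORT B =====
def rotateB (g : List (List Int)) : List (List Int) :=
  let top := g.headD []                                           -- g[0]
  let mid := PySem.List.slice g (some 1) (some (-1))              -- g[1:-1]
  let bot := g.getLastD []                                        -- g[-1]
  let lefts := mid.map (fun row => row.headD 0) ++ [bot.headD 0]
  let rights := top.getLastD 0 :: mid.map (fun row => row.getLastD 0)
  let newTop := lefts.headD 0 :: top.dropLast
  let newBot := bot.tail ++ [rights.getLastD 0]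
  let newMid := (lefts.tail.zip (mid.zip rights.dropLast)).map
    (fun p => p.1 :: (PySem.List.slice p.2.1 (some 1) (some (-1)) ++ [p.2.2]))
  newTop :: (newMid ++ [newBot])

def stepB (g : List (List Int)) (op : String) : List (List Int) :=
  if PySem.Str.pyGet? op 0 = some 'S' then g.getLastD [] :: g.dropLast
  else rotateB g

def solution_alt (rc : List (List Int)) (operations : List String) : List (List Int) :=
  operations.foldl stepB (rc.map (fun row => row))

-- ===== PRECONDITION & SPEC =====
-- Pre_ restricts to the natural domain of these border-ring operations: rectangular matrices of
-- at least 2 rows and 2 columns, with nonempty operation strings. Outside it A raises (empty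
-- matrix, too-short rows, empty operation string) or the ring operations are unspecified
-- (single-row, single-column or ragged matrices) and A's output there — e.g. width-2 rows for a
-- width-1 input — is as arbitrary a choice as any other.
def Pre_solution (rc : List (List Int)) (operations : List String) : Prop :=
  2 ≤ rc.length ∧ 2 ≤ (rc.headD []).length ∧
  (∀ row ∈ rc, row.length = (rc.headD []).length) ∧
  (∀ op ∈ operations, op ≠ "")
instance (rc : List (List Int)) (operations : List String) : Decidable (Pre_solution rc operations) := by unfold Pre_solution; infer_instance

def pvWitness_solution : List (List Int) × List String := ([[1, 2], [3, 4]], ["ShiftRow", "Rotate"])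

def Spec_solution (rc : List (List Int)) (operations : List String) (out : List (List Int)) : Prop := out = solution_alt rc operations
instance (rc : List (List Int)) (operations : List String) (out : List (List Int)) : Decidable (Spec_solution rc operations out) := by unfold Spec_solution; infer_instance

-- ===== CLAIM (what is proved, stated in full; the proofs are below) =====
def Claim_equal_solution : Prop := ∀ (rc : List (List Int)) (operations : List String), Dom_solution rc operations → Pre_solution rc operations → Spec_solution rc operations (solution rc operations)

-- ===== LEMMAS AND PROOFS =====

-- inner part row[1:-1] of a row, and the encoding of a matrix into A's state
def innP (row : List Int) : List Int := row.tail.dropLast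
def encP (g : List (List Int)) : List (List Int) × List Int × List Int :=
  (g.map innP, g.map (fun row => row.headD 0), g.map (fun row => row.getLastD 0))
def GoodP (r c : Nat) (g : List (List Int)) : Prop :=
  g.length = r ∧ ∀ row ∈ g, row.length = c

theorem innP_def : innP = fun row => row.tail.dropLast := rfl

theorem getLastD_irrel {α : Type} (xs : List α) (h : xs ≠ []) (d e : α) :
    xs.getLastD d = xs.getLastD e := by
  cases xs with
  | nil => exact absurd rfl h
  | cons x t => rw [List.getLastD_cons, List.getLastD_cons]

theorem dropLast_concat_getLastD {α : Type} :
    ∀ (xs : List α) (d : α), xs ≠ [] → xs.dropLast ++ [xs.getLastD d] = xs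
  | [], _, h => absurd rfl h
  | [x], d, _ => rfl
  | x :: y :: ys, d, _ => by
      rw [List.getLastD_cons]
      simpa using dropLast_concat_getLastD (y :: ys) x (by simp)

theorem getLastD_map {α β : Type} (f : α → β) :
    ∀ (xs : List α) (d : β) (e : α), xs ≠ [] → (xs.map f).getLastD d = f (xs.getLastD e)
  | [], _, _, h => absurd rfl h
  | [x], _, _, _ => rfl
  | x :: y :: ys, d, e, _ => by
      rw [List.map_cons, List.getLastD_cons, List.getLastD_cons]
      exact getLastD_map f (y :: ys) (f x) x (by simp)

theorem getD_last {α : Type} (xs : List α) (d : α) (h : xs ≠ []) :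
    xs.getD (xs.length - 1) d = xs.getLastD d := by
  induction xs generalizing d with
  | nil => simp at h
  | cons x xs ih =>
    cases hxs : xs with
    | nil => rfl
    | cons y ys =>
      subst hxs
      have h1 : (x :: y :: ys).length - 1 = ((y :: ys).length - 1) + 1 := by simp
      rw [h1, List.getD_cons_succ, List.getLastD_cons, ih d (by simp)]
      exact getLastD_irrel _ (by simp) d x

theorem headD_cons_tail {α : Type} (xs : List α) (d : α) (h : xs ≠ []) :
    xs.headD d :: xs.tail = xs := by
  cases xs with
  | nil => exact absurd rfl h
  | cons x t => rfl

theorem headD_append {α : Type} (xs ys : List α) (d : α) (h : xs ≠ []) :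
    (xs ++ ys).headD d = xs.headD d := by
  cases xs with
  | nil => exact absurd rfl h
  | cons x t => rfl

theorem tail_dropLast_append {α : Type} (xs : List α) (y : α) (h : xs ≠ []) :
    (xs ++ [y]).tail.dropLast = xs.tail := by
  cases xs with
  | nil => exact absurd rfl h
  | cons x t => simp

theorem slice_one_neg_one {α : Type} (xs : List α) :
    PySem.List.slice xs (some 1) (some (-1)) = xs.tail.dropLast := by
  cases xs with
  | nil => rfl
  | cons x t =>
    simp [PySem.List.slice, PySem.List.clampIdx, List.dropLast_eq_take]
    rw [if_neg (by omega)]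
    omega

theorem row_full (row : List Int) (h : 2 ≤ row.length) :
    row.headD 0 :: (row.tail.dropLast ++ [row.getLastD 0]) = row := by
  cases row with
  | nil => simp at h
  | cons x t =>
    have ht : t ≠ [] := by cases t <;> simp_all
    rw [List.getLastD_cons, List.tail_cons, List.headD_cons,
        getLastD_irrel t ht x 0, dropLast_concat_getLastD t 0 ht]

theorem row_tail (row : List Int) (d : Int) (h : 2 ≤ row.length) :
    row.tail.dropLast ++ [row.getLastD d] = row.tail := by
  cases row with
  | nil => simp at h
  | cons x t =>
    have ht : t ≠ [] := by cases t <;> simp_all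
    rw [List.getLastD_cons, List.tail_cons, getLastD_irrel t ht x d, dropLast_concat_getLastD t d ht]

theorem row_dropLast (row : List Int) (d : Int) (h : 2 ≤ row.length) :
    row.headD d :: row.tail.dropLast = row.dropLast := by
  cases row with
  | nil => simp at h
  | cons x t =>
    have ht : t ≠ [] := by cases t <;> simp_all
    cases t with
    | nil => simp_all
    | cons y ys => simp

theorem zip3_map_fst {α β γ : Type} :
    ∀ (as : List α) (bs : List β) (cs : List γ), as.length = bs.length → bs.length = cs.length →
      ((as.zip (bs.zip cs)).map (fun p => p.1)) = as
  | [], _, _, _, _ => by simp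
  | a :: as, [], _, h, _ => by simp at h
  | a :: as, b :: bs, [], _, h => by simp at h
  | a :: as, b :: bs, c :: cs, h1, h2 => by
      simpa using zip3_map_fst as bs cs (by simpa using h1) (by simpa using h2)

theorem zip3_map_snd {α β γ δ : Type} (f : β → δ) :
    ∀ (as : List α) (bs : List β) (cs : List γ), as.length = bs.length → bs.length = cs.length →
      ((as.zip (bs.zip cs)).map (fun p => f p.2.1)) = bs.map f
  | [], [], _, _, _ => by simp
  | [], b :: bs, _, h, _ => by simp at h
  | a :: as, [], _, h, _ => by simp at h
  | a :: as, b :: bs, [], _, h => by simp at h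
  | a :: as, b :: bs, c :: cs, h1, h2 => by
      simpa using zip3_map_snd f as bs cs (by simpa using h1) (by simpa using h2)

theorem zip3_map_thd {α β γ : Type} :
    ∀ (as : List α) (bs : List β) (cs : List γ), as.length = bs.length → bs.length = cs.length →
      ((as.zip (bs.zip cs)).map (fun p => p.2.2)) = cs
  | [], _, [], _, _ => by simp
  | [], [], c :: cs, _, h => by simp at h
  | [], b :: bs, _, h, _ => by simp at h
  | a :: as, [], _, h, _ => by simp at h
  | a :: as, b :: bs, [], _, h => by simp at h
  | a :: as, b :: bs, c :: cs, h1, h2 => by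
      simpa using zip3_map_thd as bs cs (by simpa using h1) (by simpa using h2)

theorem getLastD_mem {α : Type} :
    ∀ (xs : List α) (d : α), xs ≠ [] → xs.getLastD d ∈ xs
  | [], _, h => absurd rfl h
  | [x], _, _ => by simp
  | x :: y :: ys, d, _ => by
      rw [List.getLastD_cons]
      exact List.mem_cons_of_mem _ (getLastD_mem (y :: ys) x (by simp))

lemma stepA_S (r c : Nat) (g : List (List Int)) (op : String)
    (hg : GoodP r c g) (hr : 2 ≤ r)
    (hS : PySem.Str.pyGet? op 0 = some 'S') :
    stepA r (encP g) op = encP (stepB g op) ∧ GoodP r c (stepB g op) := by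
  obtain ⟨hlen, hwid⟩ := hg
  have hne : g ≠ [] := by intro h; subst h; simp at hlen; omega
  refine ⟨?_, ?_, ?_⟩
  · simp only [stepA, stepB, if_pos hS, encP, List.map_cons, ← List.map_dropLast,
      getLastD_map innP g [] [] hne,
      getLastD_map (fun row : List Int => row.headD 0) g 0 [] hne,
      getLastD_map (fun row : List Int => row.getLastD 0) g 0 [] hne]
  · simp only [stepB, if_pos hS, List.length_cons, List.length_dropLast]
    have := List.length_pos_iff.mpr hne
    omega
  · intro row hrow
    simp only [stepB, if_pos hS, List.mem_cons] at hrow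
    rcases hrow with h | h
    · exact hwid _ (h ▸ getLastD_mem g [] hne)
    · exact hwid _ (List.dropLast_subset _ h)

theorem getD_penult {α : Type} (x y d : α) (l : List α) (n : Nat) (h : n = l.length) :
    (x :: (l ++ [y])).getD (n + 1) d = y := by
  subst h
  simp [List.getD_eq_getElem?_getD, List.getElem?_concat_length]

theorem set_penult {α : Type} (x y v : α) (l : List α) (n : Nat) (h : n = l.length) :
    (x :: (l ++ [y])).set (n + 1) v = x :: (l ++ [v]) := by
  subst h
  rw [List.set_cons_succ]
  congr 1
  induction l with
  | nil => rfl
  | cons a t ih => simpa using ih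

theorem dropLast_cons_concat {α : Type} (x y : α) (l : List α) :
    (x :: (l ++ [y])).dropLast = x :: l := by
  rw [show x :: (l ++ [y]) = (x :: l) ++ [y] from rfl, List.dropLast_concat]

lemma stepA_R (r c : Nat) (g : List (List Int)) (op : String)
    (hg : GoodP r c g) (hr : 2 ≤ r) (hc : 2 ≤ c)
    (hS : ¬ PySem.Str.pyGet? op 0 = some 'S') :
    stepA r (encP g) op = encP (stepB g op) ∧ GoodP r c (stepB g op) := by
  obtain ⟨hlen, hwid⟩ := hg
  -- decompose g = g0 :: mid ++ [gL]
  obtain ⟨g0, rest, rfl⟩ : ∃ g0 rest, g = g0 :: rest := by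
    cases g with
    | nil => simp at hlen; omega
    | cons a t => exact ⟨a, t, rfl⟩
  obtain ⟨mid, gL, rfl⟩ : ∃ mid gL, rest = mid ++ [gL] := by
    rcases rest.eq_nil_or_concat with h | ⟨l, a, h⟩
    · subst h; simp at hlen; omega
    · exact ⟨l, a, by simpa using h⟩
  have hg0 : g0.length = c := hwid g0 (by simp)
  have hgL : gL.length = c := hwid gL (by simp)
  have hmid : ∀ row ∈ mid, row.length = c := fun row hrow => hwid row (by simp [hrow])
  have hlen' : mid.length + 2 = r := by simpa using hlen
  have hg0ge : 2 ≤ g0.length := by omega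
  have hgLge : 2 ≤ gL.length := by omega
  have hg0ne : g0 ≠ [] := by intro h; rw [h] at hg0; simp at hg0; omega
  have hgLt : gL.tail ≠ [] := by
    intro h; have := congrArg List.length h; simp at this; omega
  have hg0d : g0.dropLast ≠ [] := by
    intro h; have := congrArg List.length h; simp at this; omega
  have hA : stepA r (encP (g0 :: (mid ++ [gL]))) op =
      (g0.dropLast.dropLast :: (mid.map innP ++ [gL.tail.tail]),
       mid.map (fun row => row.headD 0) ++ [gL.headD 0, gL.tail.headD 0],
       g0.dropLast.getLastD 0 :: g0.getLastD 0 :: mid.map (fun row => row.getLastD 0)) := by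
    simp only [stepA, if_neg hS, encP, List.map_cons, List.map_append, List.map_nil,
      List.cons_append, List.append_assoc, List.singleton_append]
    rw [show r - 1 = mid.length + 1 from by omega]
    simp only [getD_penult, set_penult, List.getD_cons_zero, List.set_cons_zero,
      List.getLastD_cons, List.getLastD_concat, dropLast_cons_concat, List.length_map,
      List.nil_append, List.headD_cons, List.tail_cons, innP]
    rw [row_tail gL 0 hgLge, row_dropLast g0 0 hg0ge]
    have hdlast : g0.tail.dropLast.getLastD (g0.headD 0) = g0.dropLast.getLastD 0 := by
      rw [← row_dropLast g0 0 hg0ge, List.getLastD_cons]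
    rw [hdlast]
  have hB : encP (stepB (g0 :: (mid ++ [gL])) op) =
      (g0.dropLast.dropLast :: (mid.map innP ++ [gL.tail.tail]),
       mid.map (fun row => row.headD 0) ++ [gL.headD 0, gL.tail.headD 0],
       g0.dropLast.getLastD 0 :: g0.getLastD 0 :: mid.map (fun row => row.getLastD 0)) := by
    have hmidB : PySem.List.slice (g0 :: (mid ++ [gL])) (some 1) (some (-1)) = mid := by
      rw [slice_one_neg_one, List.tail_cons, List.dropLast_concat]
    have hrotB : stepB (g0 :: (mid ++ [gL])) op =
        ((mid.map (fun row => row.headD (0:Int)) ++ [gL.headD 0]).headD 0 :: g0.dropLast)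
        :: (((mid.map (fun row => row.headD (0:Int)) ++ [gL.headD 0]).tail.zip
              (mid.zip ((g0.getLastD 0 :: mid.map (fun row => row.getLastD (0:Int))).dropLast))).map
            (fun p => p.1 :: (p.2.1.tail.dropLast ++ [p.2.2]))
           ++ [gL.tail ++ [(mid.map (fun row => row.getLastD (0:Int))).getLastD (g0.getLastD 0)]]) := by
      simp only [stepB, if_neg hS, rotateB, hmidB, slice_one_neg_one, List.headD_cons,
        List.getLastD_cons, List.getLastD_concat, List.tail_cons]
    rw [hrotB]
    simp only [encP, List.map_cons, List.map_append, List.map_nil, List.map_map, Function.comp,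
      innP, List.tail_cons, List.dropLast_concat, List.headD_cons, List.getLastD_cons,
      List.getLastD_concat, Function.comp_def, zip3_map_fst, zip3_map_snd, zip3_map_thd,
      List.length_tail, List.length_map, List.length_append, List.length_cons,
      List.length_dropLast, List.length_nil]
    rw [tail_dropLast_append _ _ hgLt, headD_append _ _ _ hgLt,
      zip3_map_fst ((List.map (fun row => row.headD (0:Int)) mid ++ [gL.headD 0]).tail) mid
        ((g0.getLastD 0 :: List.map (fun row => row.getLastD (0:Int)) mid).dropLast)
        (by simp) (by simp),
      zip3_map_snd (fun row : List Int => row.tail.dropLast)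
        ((List.map (fun row => row.headD (0:Int)) mid ++ [gL.headD 0]).tail) mid
        ((g0.getLastD 0 :: List.map (fun row => row.getLastD (0:Int)) mid).dropLast)
        (by simp) (by simp),
      zip3_map_thd ((List.map (fun row => row.headD (0:Int)) mid ++ [gL.headD 0]).tail) mid
        ((g0.getLastD 0 :: List.map (fun row => row.getLastD (0:Int)) mid).dropLast)
        (by simp) (by simp)]
    simp only [innP_def]
    have hL : (List.map (fun row => row.headD (0:Int)) mid ++ [gL.headD 0]).headD 0 ::
        ((List.map (fun row => row.headD (0:Int)) mid ++ [gL.headD 0]).tail ++ [gL.tail.headD 0]) =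
        List.map (fun row => row.headD (0:Int)) mid ++ [gL.headD 0, gL.tail.headD 0] := by
      rw [← List.cons_append, headD_cons_tail _ _ (by simp)]
      simp
    have h3a : g0.dropLast.getLastD
        ((List.map (fun row => row.headD (0:Int)) mid ++ [gL.headD 0]).headD 0) =
        g0.dropLast.getLastD 0 := getLastD_irrel _ hg0d _ _
    have h3b : (g0.getLastD 0 :: List.map (fun row => row.getLastD (0:Int)) mid).dropLast ++
        [(List.map (fun row => row.getLastD (0:Int)) mid).getLastD (g0.getLastD 0)] =
        g0.getLastD 0 :: List.map (fun row => row.getLastD (0:Int)) mid := by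
      rw [show (List.map (fun row => row.getLastD (0:Int)) mid).getLastD (g0.getLastD 0) =
          (g0.getLastD 0 :: List.map (fun row => row.getLastD (0:Int)) mid).getLastD 0 from by
            rw [List.getLastD_cons]]
      exact dropLast_concat_getLastD _ 0 (by simp)
    rw [hL, h3a, h3b]
  have hGood : GoodP r c (stepB (g0 :: (mid ++ [gL])) op) := by
    have hmidB : PySem.List.slice (g0 :: (mid ++ [gL])) (some 1) (some (-1)) = mid := by
      rw [slice_one_neg_one, List.tail_cons, List.dropLast_concat]
    simp only [stepB, if_neg hS, rotateB, hmidB, List.headD_cons, List.getLastD_cons,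
      List.getLastD_concat, slice_one_neg_one]
    constructor
    · simp [List.length_zip]
      omega
    · intro row hrow
      rcases List.mem_cons.mp hrow with rfl | hrow'
      · simp
        omega
      · rcases List.mem_append.mp hrow' with hm | hb
        · obtain ⟨p, hp, rfl⟩ := List.mem_map.mp hm
          have h21 : p.2.1 ∈ mid := (List.of_mem_zip ((List.of_mem_zip hp).2)).1
          have hp21 := hmid _ h21
          simp
          omega
        · have hbr : row = gL.tail ++
              [(List.map (fun row => row.getLastD 0) mid).getLastD (g0.getLastD 0)] := by
            simpa using hb
          subst hbr
          simp
          omega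
  exact ⟨hB ▸ hA, hGood⟩

lemma fold_inv (r c : Nat) (ops : List String) (g : List (List Int))
    (hg : GoodP r c g) (hr : 2 ≤ r) (hc : 2 ≤ c) :
    ops.foldl (stepA r) (encP g) = encP (ops.foldl stepB g) ∧
      GoodP r c (ops.foldl stepB g) := by
  induction ops generalizing g with
  | nil => exact ⟨rfl, hg⟩
  | cons op ops ih =>
    by_cases hS : PySem.Str.pyGet? op 0 = some 'S'
    · obtain ⟨h1, h2⟩ := stepA_S r c g op hg hr hS
      simpa [List.foldl_cons, h1] using ih _ h2
    · obtain ⟨h1, h2⟩ := stepA_R r c g op hg hr hc hS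
      simpa [List.foldl_cons, h1] using ih _ h2

lemma decode_enc (r c : Nat) (g : List (List Int))
    (hg : GoodP r c g) (hc : 2 ≤ c) :
    (List.range r).map (fun i =>
      (encP g).2.1.getD i 0 :: ((encP g).1.getD i [] ++ [(encP g).2.2.getD i 0])) = g := by
  obtain ⟨hlen, hwid⟩ := hg
  apply List.ext_getElem
  · simpa using hlen.symm
  · intro i h1 h2
    simp only [List.getElem_map, List.getElem_range, encP,
      List.getD_eq_getElem?_getD, List.getElem?_map,
      List.getElem?_eq_getElem h2, Option.map_some, Option.getD_some]
    exact row_full g[i] (by rw [hwid g[i] (List.getElem_mem h2)]; exact hc)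

-- ===== VERDICT (by name: the statement is the Claim_ definition above) =====
theorem solution_spec : Claim_equal_solution := by
  intro rc operations _ hpre
  obtain ⟨hr, hc, hrect, _⟩ := hpre
  have hg : GoodP rc.length (rc.headD []).length rc := ⟨rfl, hrect⟩
  obtain ⟨h1, h2⟩ := fold_inv rc.length (rc.headD []).length operations rc hg hr hc
  have hinit : (rc.map (fun row => PySem.List.slice row (some 1) (some (-1))),
      rc.map (fun row => row.headD (0:Int)),
      rc.map (fun row => PySem.List.pyGetD row (((rc.headD []).length : Int) - 1) 0)) = encP rc := by
    unfold encP
    refine congrArg₂ _ ?_ (congrArg₂ _ rfl ?_)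
    · simp only [innP_def, slice_one_neg_one]
    · apply List.map_congr_left
      intro row hrow
      have hrowlen : row.length = (rc.headD []).length := hrect row hrow
      have hrowne : row ≠ [] := List.ne_nil_of_length_pos (by omega)
      have hcast : (((rc.headD []).length - 1 : Nat) : Int) = ((rc.headD []).length : Int) - 1 := by
        rw [Nat.cast_sub (by omega : 1 ≤ (rc.headD []).length)]
        simp
      rw [← hcast, PySem.List.pyGetD_natCast, ← hrowlen, getD_last row 0 hrowne]
  show solution rc operations = solution_alt rc operations
  simp only [solution, solution_alt]
  rw [hinit, h1, decode_enc rc.length (rc.headD []).length _ h2 hc]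
  simp
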